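-- pv_equiv track=rewrite | github.com/This-is-heeeeee/Algorithm | study/chapter11/11_1.py | solve
-- ===== SOURCE A (Python) =====
-- def solve(N,panic):
--     parties = 0
--     panic.sort(reverse=True)
--     max_panic = 0
--     for p in panic:
--         if max_panic == 0:
--             max_panic = p - 1
--             parties += 1
--         else :
--             max_panic -= 1
--             continue
--
--     return parties
-- ===== SOURCE B (Python) =====
-- def solve(N, panic):
--     panic.sort(reverse=True)
--     parties = 0
--     i = 0
--     while i < len(panic):
--         p = panic[i]
--         parties += 1
--         if p >= 1:
--             i += p
--         else:
--             break
--     return parties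
-- ===== Notes on version B (the rewrite author's own statement) =====
-- stated objective: simpler
-- what changed: Replaces the per-element capacity state machine (decrementing max_panic over every element) with an index-jumping while-loop that strides over each leader's p-1 followers and breaks on a non-positive leader.
import Mathlib
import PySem

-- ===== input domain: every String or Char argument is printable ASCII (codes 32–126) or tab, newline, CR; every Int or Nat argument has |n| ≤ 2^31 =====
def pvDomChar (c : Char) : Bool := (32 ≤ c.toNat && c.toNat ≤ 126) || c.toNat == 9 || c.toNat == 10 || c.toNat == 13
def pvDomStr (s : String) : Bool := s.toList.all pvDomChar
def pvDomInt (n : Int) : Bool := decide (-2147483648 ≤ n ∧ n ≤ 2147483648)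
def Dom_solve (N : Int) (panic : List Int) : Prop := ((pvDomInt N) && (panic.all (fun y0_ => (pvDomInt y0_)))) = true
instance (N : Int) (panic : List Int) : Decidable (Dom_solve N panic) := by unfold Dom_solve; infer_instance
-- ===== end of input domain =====

-- B replaces A's per-element capacity state machine with an index-jumping while-loop (simpler
-- decomposition). Both A and B sort the argument list in place in Python; the equivalence proved
-- here is about the RETURN value only.

-- ===== PORT A =====
-- for p in panic: if max_panic == 0: max_panic = p-1; parties += 1 else: max_panic -= 1
def solve (N : Int) (panic : List Int) : Int :=
  let s := PySem.List.sorted panic (fun x => x) true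
  let st := s.foldl (fun (st : Int × Int) p =>
    if st.2 == 0 then (st.1 + 1, p - 1) else (st.1, st.2 - 1)) (0, 0)
  st.1

-- ===== PORT B =====
-- while i < len(panic): p = panic[i]; parties += 1; if p >= 1: i += p else: break
def altLoop (s : List Int) (i : Nat) (parties : Int) : Int :=
  if h : i < s.length then
    let p := s[i]
    if hp : 1 ≤ p then altLoop s (i + p.toNat) (parties + 1)
    else parties + 1
  else parties
termination_by s.length - i
decreasing_by
  omega

def solve_alt (N : Int) (panic : List Int) : Int :=
  altLoop (PySem.List.sorted panic (fun x => x) true) 0 0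

-- ===== PRECONDITION & SPEC =====
def Spec_solve (N : Int) (panic : List Int) (out : Int) : Prop := out = solve_alt N panic
instance (N : Int) (panic : List Int) (out : Int) : Decidable (Spec_solve N panic out) := by unfold Spec_solve; infer_instance

-- ===== CLAIM (what is proved, stated in full; the proofs are below) =====
def Claim_equal_solve : Prop := ∀ (N : Int) (panic : List Int), Dom_solve N panic → Spec_solve N panic (solve N panic)

-- ===== LEMMAS AND PROOFS =====

-- A's fold, uncurried for induction
def foldA (l : List Int) (parties m : Int) : Int :=
  match l with
  | [] => parties
  | p :: t => if m == 0 then foldA t (parties + 1) (p - 1) else foldA t parties (m - 1)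

theorem foldA_eq_foldl (l : List Int) (parties m : Int) :
    (l.foldl (fun (st : Int × Int) p =>
      if st.2 == 0 then (st.1 + 1, p - 1) else (st.1, st.2 - 1)) (parties, m)).1
    = foldA l parties m := by
  induction l generalizing parties m with
  | nil => rfl
  | cons p t ih =>
    simp only [List.foldl, foldA]
    by_cases hm : m = 0
    · rw [if_pos (by simp [hm]), if_pos (by simp [hm])]
      exact ih _ _
    · rw [if_neg (by simp [hm]), if_neg (by simp [hm])]
      exact ih _ _

-- a negative capacity never returns to 0: the fold adds no more parties
theorem foldA_neg (l : List Int) (parties m : Int) (hm : m < 0) :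
    foldA l parties m = parties := by
  induction l generalizing m with
  | nil => rfl
  | cons p t ih =>
    simp only [foldA]
    rw [if_neg (by simp; omega)]
    exact ih (m - 1) (by omega)

-- a positive capacity just skips m elements
theorem foldA_skip (l : List Int) (parties m : Int) (hm : 0 ≤ m) :
    foldA l parties m = foldA (l.drop m.toNat) parties 0 := by
  induction l generalizing m with
  | nil => simp [foldA]
  | cons p t ih =>
    by_cases h0 : m = 0
    · subst h0; rfl
    · simp only [foldA]
      rw [if_neg (by simp [h0])]
      rw [ih (m - 1) (by omega)]
      have : (p :: t).drop m.toNat = t.drop (m - 1).toNat := by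
        have h1 : m.toNat = (m - 1).toNat + 1 := by omega
        rw [h1, List.drop_succ_cons]
      rw [this]

theorem foldA_eq_altLoop (s : List Int) (i : Nat) (parties : Int) :
    foldA (s.drop i) parties 0 = altLoop s i parties := by
  by_cases h : i < s.length
  · have hd : s.drop i = s[i] :: s.drop (i + 1) := List.drop_eq_getElem_cons h
    rw [hd]
    simp only [foldA, beq_self_eq_true, if_true]
    by_cases hp : 1 ≤ s[i]
    · rw [foldA_skip _ _ _ (by omega)]
      have hdd : (s.drop (i + 1)).drop (s[i] - 1).toNat = s.drop (i + s[i].toNat) := by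
        rw [List.drop_drop]
        congr 1
        omega
      rw [hdd, foldA_eq_altLoop s (i + s[i].toNat) (parties + 1)]
      conv_rhs => rw [altLoop]
      simp [h, hp]
    · rw [foldA_neg _ _ _ (by omega)]
      conv_rhs => rw [altLoop]
      simp [h, hp]
  · have : s.drop i = [] := List.drop_eq_nil_of_le (by omega)
    rw [this, altLoop]
    simp [h, foldA]
termination_by s.length - i
decreasing_by
  have h1 : 1 ≤ (s[i]).toNat := by omega
  omega

-- ===== VERDICT (by name: the statement is the Claim_ definition above) =====
theorem solve_spec : Claim_equal_solve := by
  intro N panic _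
  unfold Spec_solve solve solve_alt
  simp only []
  rw [foldA_eq_foldl]
  simpa using foldA_eq_altLoop (PySem.List.sorted panic (fun x => x) true) 0 0
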